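-- pv_equiv track=rewrite | github.com/btrkeks/transcoda | scripts/dataset_generation/normalization/passes/merge_split_normalizer.py | _compute_post_merge_spine_count
-- ===== SOURCE A (Python) =====
-- def _compute_post_merge_spine_count(merge_line: str) -> int:
--     """Compute spine count after applying a merge line.
--
--     Adjacent *v tokens merge into one spine.
--     """
--     tokens = merge_line.split("\t")
--     count = 0
--     i = 0
--     while i < len(tokens):
--         if tokens[i] == "*v":
--             count += 1
--             while i < len(tokens) and tokens[i] == "*v":
--                 i += 1
--             continue
--         else:
--             count += 1
--             i += 1
--     return count
-- ===== SOURCE B (Python) =====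
-- def _compute_post_merge_spine_count(merge_line: str) -> int:
--     """Spine count = total tokens minus the number of adjacent *v collisions."""
--     tokens = merge_line.split("\t")
--     merges = sum(1 for prev, cur in zip(tokens, tokens[1:])
--                  if prev == "*v" and cur == "*v")
--     return len(tokens) - merges
-- ===== Notes on version B (the rewrite author's own statement) =====
-- stated objective: simpler
-- what changed: Replaces the nested while-loop group scan by a single zip pass counting adjacent *v pairs and subtracting them from the token count.
import Mathlib
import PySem

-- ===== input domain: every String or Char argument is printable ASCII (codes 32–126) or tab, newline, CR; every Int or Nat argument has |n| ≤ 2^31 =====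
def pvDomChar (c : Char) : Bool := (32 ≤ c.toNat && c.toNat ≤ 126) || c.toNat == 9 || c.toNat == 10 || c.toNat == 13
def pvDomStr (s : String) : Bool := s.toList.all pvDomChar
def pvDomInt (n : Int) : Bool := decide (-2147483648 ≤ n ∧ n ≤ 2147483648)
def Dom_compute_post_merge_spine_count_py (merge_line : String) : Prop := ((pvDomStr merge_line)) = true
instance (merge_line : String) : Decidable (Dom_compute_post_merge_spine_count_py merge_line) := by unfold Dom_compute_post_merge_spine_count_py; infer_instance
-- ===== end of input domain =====

-- B changes the decomposition: one zip pass counting adjacent *v collisions, subtracted from the token count (simpler; same cost).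

-- ===== PORT A =====
-- inner 'while i < len(tokens) and tokens[i] == "*v": i += 1' (skips the *v run)
def pvSkipV : List String → List String
  | [] => []
  | t :: ts => if t == "*v" then pvSkipV ts else t :: ts

theorem pvSkipV_length_le : ∀ ts : List String, (pvSkipV ts).length ≤ ts.length := by
  intro ts
  induction ts with
  | nil => simp [pvSkipV]
  | cons t ts ih =>
    by_cases h : t == "*v"
    · simp only [pvSkipV, h, if_true, List.length_cons]
      omega
    · simp [pvSkipV, h]

-- the outer while loop, state = (remaining tokens, count)
def pvLoopA : List String → Int → Int
  | [], c => c
  | t :: ts, c =>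
      if t == "*v" then pvLoopA (pvSkipV ts) (c + 1)
      else pvLoopA ts (c + 1)
termination_by ts _ => ts.length
decreasing_by
  · exact Nat.lt_succ_of_le (pvSkipV_length_le ts)
  · simp

def compute_post_merge_spine_count_py (merge_line : String) : Int :=
  pvLoopA ((PySem.Str.split? merge_line "\t").getD []) 0

-- ===== PORT B =====
def compute_post_merge_spine_count_py_alt (merge_line : String) : Int :=
  let tokens := (PySem.Str.split? merge_line "\t").getD []
  let merges : Int :=
    (tokens.zip (PySem.List.slice tokens (some 1) none)).foldl
      (fun acc p => if p.1 == "*v" && p.2 == "*v" then acc + 1 else acc) 0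
  (tokens.length : Int) - merges

-- ===== PRECONDITION & SPEC =====
def Spec_compute_post_merge_spine_count_py (merge_line : String) (out : Int) : Prop := out = compute_post_merge_spine_count_py_alt merge_line
instance (merge_line : String) (out : Int) : Decidable (Spec_compute_post_merge_spine_count_py merge_line out) := by unfold Spec_compute_post_merge_spine_count_py; infer_instance

-- ===== CLAIM (what is proved, stated in full; the proofs are below) =====
def Claim_equal_compute_post_merge_spine_count_py : Prop := ∀ (merge_line : String), Dom_compute_post_merge_spine_count_py merge_line → Spec_compute_post_merge_spine_count_py merge_line (compute_post_merge_spine_count_py merge_line)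

-- ===== LEMMAS AND PROOFS =====
-- number of adjacent (*v, *v) pairs in a token list
def pvMerges : List String → Int
  | a :: b :: ts => (if a == "*v" && b == "*v" then 1 else 0) + pvMerges (b :: ts)
  | _ => 0

theorem pvSkipV_key : ∀ ts : List String,
    ((pvSkipV ts).length : Int) - pvMerges (pvSkipV ts)
      = (ts.length : Int) - pvMerges ("*v" :: ts) := by
  intro ts
  induction ts with
  | nil => simp [pvSkipV, pvMerges]
  | cons t ts ih =>
    by_cases h : t == "*v"
    · have ht : t = "*v" := eq_of_beq h
      subst ht
      simp only [pvSkipV, beq_self_eq_true, if_true]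
      rw [ih]
      simp only [pvMerges, beq_self_eq_true, Bool.and_self, if_true, List.length_cons]
      push_cast
      omega
    · simp [pvSkipV, h, pvMerges]

theorem pvLoopA_eq : ∀ (ts : List String) (c : Int),
    pvLoopA ts c = c + (ts.length : Int) - pvMerges ts := by
  intro ts c
  induction ts, c using pvLoopA.induct with
  | case1 c => simp [pvLoopA, pvMerges]
  | case2 t ts c h ih =>
    have ht : t = "*v" := eq_of_beq h
    subst ht
    rw [pvLoopA, if_pos h, ih]
    have hk := pvSkipV_key ts
    simp only [List.length_cons] at hk ⊢
    push_cast at hk ⊢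
    omega
  | case3 t ts c h ih =>
    rw [pvLoopA, if_neg (by simpa using h), ih]
    cases ts with
    | nil => simp [pvMerges]
    | cons b ts =>
      simp only [pvMerges, h, Bool.false_and, List.length_cons]
      push_cast
      omega

theorem pvFold_eq : ∀ (ts : List String) (a : Int),
    (ts.zip ts.tail).foldl
      (fun acc p => if p.1 == "*v" && p.2 == "*v" then acc + 1 else acc) a
      = a + pvMerges ts := by
  intro ts
  induction ts with
  | nil => intro a; simp [pvMerges]
  | cons t ts ih =>
    intro a
    cases ts with
    | nil => simp [pvMerges]
    | cons b ts =>
      simp only [List.tail_cons, List.zip_cons_cons, List.foldl_cons, pvMerges]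
      rw [show (b :: ts).zip ts = (b :: ts).zip (b :: ts).tail from rfl, ih]
      split_ifs <;> omega

-- ===== VERDICT (by name: the statement is the Claim_ definition above) =====
theorem compute_post_merge_spine_count_py_spec : Claim_equal_compute_post_merge_spine_count_py := by
  intro s _
  unfold Spec_compute_post_merge_spine_count_py compute_post_merge_spine_count_py compute_post_merge_spine_count_py_alt
  simp only [PySem.List.slice_from_one, pvFold_eq, pvLoopA_eq]
  omega
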